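-- pv_equiv track=rewrite | github.com/paiml/depyler | examples/hard_edge_nested_loops.py | find_triplet_sum
-- ===== SOURCE A (Python) =====
-- def find_triplet_sum(arr: list[int], target: int) -> list[int]:
--     """Find first triplet that sums to target. Returns indices or empty."""
--     n: int = len(arr)
--     i: int = 0
--     while i < n:
--         j: int = i + 1
--         while j < n:
--             k: int = j + 1
--             while k < n:
--                 total: int = arr[i] + arr[j] + arr[k]
--                 if total == target:
--                     return [i, j, k]
--                 k = k + 1
--             j = j + 1
--         i = i + 1
--     return []
-- ===== SOURCE B (Python) =====
-- def find_triplet_sum(arr: list[int], target: int) -> list[int]: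
--     """Find first triplet that sums to target. Returns indices or empty."""
--     pos = {}
--     for idx, v in enumerate(arr):
--         pos.setdefault(v, []).append(idx)
--     n = len(arr)
--     for i in range(n):
--         for j in range(i + 1, n):
--             need = target - arr[i] - arr[j]
--             for k in pos.get(need, []):
--                 if k > j:
--                     return [i, j, k]
--     return []
-- ===== Notes on version B (the rewrite author's own statement) =====
-- stated objective: faster
-- what changed: The innermost scan over all k is replaced by a value->sorted-index-list dict built once; for each pair (i,j) B looks up the needed third value and takes its first index > j.
import Mathlib
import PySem

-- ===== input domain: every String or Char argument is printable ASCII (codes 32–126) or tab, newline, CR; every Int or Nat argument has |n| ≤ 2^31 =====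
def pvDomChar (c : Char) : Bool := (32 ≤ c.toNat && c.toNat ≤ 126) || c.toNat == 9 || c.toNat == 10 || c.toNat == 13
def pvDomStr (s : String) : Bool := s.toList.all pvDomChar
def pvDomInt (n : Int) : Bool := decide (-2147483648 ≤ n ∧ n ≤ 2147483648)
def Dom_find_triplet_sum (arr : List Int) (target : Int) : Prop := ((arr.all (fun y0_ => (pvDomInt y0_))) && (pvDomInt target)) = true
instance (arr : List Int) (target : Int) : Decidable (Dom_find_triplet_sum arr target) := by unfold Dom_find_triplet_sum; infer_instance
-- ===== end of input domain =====

-- B replaces A's innermost k-scan by a value→index-list dict built once (first index > j via a scan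
-- of that value's ascending index list); same return value, faster on value-diverse inputs.

-- ===== PORT A =====
-- The while loops are ported as structural recursion with a fuel counter (fuel = arr.length is
-- always enough, since each loop index stays < arr.length); the k < n tests are the Python tests.

-- innermost 'while k < n' loop (indices are always in range, so pyGetD's default is never used)
def fLoopK (arr : List Int) (target i j : Int) : Nat → Int → Option (List Int)
  | 0, _ => none
  | fuel + 1, k =>
    if k < (arr.length : Int) then
      let total : Int := PySem.List.pyGetD arr i 0 + PySem.List.pyGetD arr j 0 + PySem.List.pyGetD arr k 0
      if total = target then some [i, j, k] else fLoopK arr target i j fuel (k + 1)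
    else none

-- middle 'while j < n' loop
def fLoopJ (arr : List Int) (target i : Int) : Nat → Int → Option (List Int)
  | 0, _ => none
  | fuel + 1, j =>
    if j < (arr.length : Int) then
      match fLoopK arr target i j arr.length (j + 1) with
      | some r => some r
      | none => fLoopJ arr target i fuel (j + 1)
    else none

-- outer 'while i < n' loop
def fLoopI (arr : List Int) (target : Int) : Nat → Int → Option (List Int)
  | 0, _ => none
  | fuel + 1, i =>
    if i < (arr.length : Int) then
      match fLoopJ arr target i arr.length (i + 1) with
      | some r => some r
      | none => fLoopI arr target fuel (i + 1)
    else none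

def find_triplet_sum (arr : List Int) (target : Int) : List Int :=
  match fLoopI arr target arr.length 0 with
  | some r => r
  | none => []

-- ===== PORT B =====
-- pos = {}; for idx, v in enumerate(arr): pos.setdefault(v, []).append(idx)
def buildPos (arr : List Int) : PySem.Dict Int (List Int) :=
  (PySem.List.enumerate arr 0).foldl
    (fun d p => d.modify p.2 [] (fun l => l ++ [p.1])) PySem.Dict.empty

-- for k in ps: if k > j: return k   (first element of ps greater than j)
def firstGt : List Int → Int → Option Int
  | [], _ => none
  | k :: rest, j => if j < k then some k else firstGt rest j

-- for j in range(i+1, n):  (same fuel scheme as port A's loop recursions)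
def bLoopJ (arr : List Int) (target : Int) (pos : PySem.Dict Int (List Int)) (i : Int) :
    Nat → Int → Option (List Int)
  | 0, _ => none
  | fuel + 1, j =>
    if j < (arr.length : Int) then
      let need : Int := target - PySem.List.pyGetD arr i 0 - PySem.List.pyGetD arr j 0
      match firstGt (pos.getD need []) j with
      | some k => some [i, j, k]
      | none => bLoopJ arr target pos i fuel (j + 1)
    else none

-- for i in range(n):
def bLoopI (arr : List Int) (target : Int) (pos : PySem.Dict Int (List Int)) :
    Nat → Int → Option (List Int)
  | 0, _ => none
  | fuel + 1, i =>
    if i < (arr.length : Int) then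
      match bLoopJ arr target pos i arr.length (i + 1) with
      | some r => some r
      | none => bLoopI arr target pos fuel (i + 1)
    else none

def find_triplet_sum_alt (arr : List Int) (target : Int) : List Int :=
  match bLoopI arr target (buildPos arr) arr.length 0 with
  | some r => r
  | none => []

-- ===== PRECONDITION & SPEC =====
def Spec_find_triplet_sum (arr : List Int) (target : Int) (out : List Int) : Prop := out = find_triplet_sum_alt arr target
instance (arr : List Int) (target : Int) (out : List Int) : Decidable (Spec_find_triplet_sum arr target out) := by unfold Spec_find_triplet_sum; infer_instance

-- ===== CLAIM (what is proved, stated in full; the proofs are below) =====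
def Claim_equal_find_triplet_sum : Prop := ∀ (arr : List Int) (target : Int), Dom_find_triplet_sum arr target → Spec_find_triplet_sum arr target (find_triplet_sum arr target)

-- ===== LEMMAS AND PROOFS =====

-- spec of the per-value index lists: indices (from off) of elements equal to v, ascending
def posSpec : List Int → Int → Int → List Int
  | [], _, _ => []
  | a :: rest, off, v => (if a = v then [off] else []) ++ posSpec rest (off + 1) v

lemma posSpec_ge (l : List Int) (off v x : Int) (hx : x ∈ posSpec l off v) : off ≤ x := by
  induction l generalizing off with
  | nil => simp [posSpec] at hx
  | cons a rest ih =>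
    simp only [posSpec, List.mem_append] at hx
    rcases hx with hx | hx
    · split at hx <;> simp_all
    · have := ih (off + 1) hx; omega

lemma posSpec_lt (l : List Int) (off v x : Int) (hx : x ∈ posSpec l off v) :
    x < off + l.length := by
  induction l generalizing off with
  | nil => simp [posSpec] at hx
  | cons a rest ih =>
    simp only [posSpec, List.mem_append] at hx
    rcases hx with hx | hx
    · have hxo : x = off := by split at hx <;> simp_all
      simp only [List.length_cons]; push_cast; omega
    · have := ih (off + 1) hx; simp only [List.length_cons]; push_cast; omega

lemma posSpec_append (l₁ l₂ : List Int) (off v : Int) :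
    posSpec (l₁ ++ l₂) off v = posSpec l₁ off v ++ posSpec l₂ (off + l₁.length) v := by
  induction l₁ generalizing off with
  | nil => simp [posSpec]
  | cons a rest ih =>
    simp only [List.cons_append, posSpec, ih, List.length_cons, List.append_assoc]
    congr 2
    push_cast; ring_nf

lemma buildPos_foldl (l : List Int) (d : PySem.Dict Int (List Int)) (off v : Int) :
    (((PySem.List.enumerate l off).foldl
        (fun d p => d.modify p.2 [] (fun l => l ++ [p.1])) d).getD v []) =
      d.getD v [] ++ posSpec l off v := by
  induction l generalizing d off with
  | nil => simp [PySem.List.enumerate_nil, posSpec]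
  | cons a rest ih =>
    rw [PySem.List.enumerate_cons]
    simp only [List.foldl_cons, posSpec]
    rw [ih]
    by_cases hv : a = v
    · subst hv
      rw [PySem.Dict.getD_modify_self]
      simp
    · rw [PySem.Dict.getD_modify_of_ne]
      · simp [hv]
      · exact fun h => hv h.symm

lemma buildPos_getD (arr : List Int) (v : Int) :
    (buildPos arr).getD v [] = posSpec arr 0 v := by
  unfold buildPos
  rw [buildPos_foldl]
  rfl

lemma firstGt_append_le (xs ys : List Int) (j : Int) (h : ∀ x ∈ xs, x ≤ j) :
    firstGt (xs ++ ys) j = firstGt ys j := by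
  induction xs with
  | nil => rfl
  | cons a rest ih =>
    have ha := h a (by simp)
    simp only [List.cons_append, firstGt]
    rw [if_neg (by omega)]
    exact ih (fun x hx => h x (by simp [hx]))

lemma firstGt_all_gt (xs : List Int) (j : Int) (h : ∀ x ∈ xs, j < x) :
    firstGt xs j = xs.head? := by
  cases xs with
  | nil => rfl
  | cons a rest =>
    simp only [firstGt, List.head?_cons]
    rw [if_pos (h a (by simp))]

-- A's innermost loop as a structural scan matching only value = need
def scanK (need i j : Int) : List Int → Int → Option (List Int)
  | [], _ => none
  | a :: rest, k => if a = need then some [i, j, k] else scanK need i j rest (k + 1)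

lemma fLoopK_eq_scanK (arr : List Int) (target i j : Int) :
    ∀ (l : List Int) (fuel : Nat) (k : Int), 0 ≤ k → l = arr.drop k.toNat →
      (arr.length : Int) - k ≤ (fuel : Int) →
      fLoopK arr target i j fuel k =
        scanK (target - PySem.List.pyGetD arr i 0 - PySem.List.pyGetD arr j 0) i j l k := by
  intro l
  induction l with
  | nil =>
    intro fuel k hk hl hf
    have hlen : arr.length ≤ k.toNat := by
      by_contra h
      have := List.drop_eq_nil_iff.mp hl.symm
      omega
    cases fuel with
    | zero => rfl
    | succ f =>
      rw [fLoopK, if_neg (by omega)]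
      rfl
  | cons a rest ih =>
    intro fuel k hk hl hf
    have hklt : k.toNat < arr.length := by
      by_contra h
      rw [List.drop_eq_nil_of_le (by omega)] at hl
      simp at hl
    have hsome : arr[k.toNat]? = some a := by
      have h0 : (arr.drop k.toNat)[0]? = arr[k.toNat + 0]? := List.getElem?_drop
      rw [← hl] at h0
      simpa using h0.symm
    have hget : PySem.List.pyGetD arr k 0 = a := by
      rw [PySem.List.pyGetD_eq_getElem arr 0 hk (by omega)]
      rw [List.getElem?_eq_getElem hklt] at hsome
      exact Option.some.inj hsome
    have hrest : rest = arr.drop (k + 1).toNat := by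
      have h1 : (k + 1).toNat = k.toNat + 1 := by omega
      rw [h1, ← List.drop_drop, ← hl]
      rfl
    cases fuel with
    | zero => exact absurd hf (by push_cast; omega)
    | succ f =>
      rw [fLoopK, if_pos (by omega)]
      simp only [hget, scanK]
      have hiff : (PySem.List.pyGetD arr i 0 + PySem.List.pyGetD arr j 0 + a = target) ↔
          (a = target - PySem.List.pyGetD arr i 0 - PySem.List.pyGetD arr j 0) := by omega
      by_cases hc : a = target - PySem.List.pyGetD arr i 0 - PySem.List.pyGetD arr j 0
      · rw [if_pos (hiff.mpr hc), if_pos hc]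
      · rw [if_neg (fun h => hc (hiff.mp h)), if_neg hc]
        exact ih f (k + 1) (by omega) hrest (by omega)

lemma scanK_eq_head (need i j : Int) :
    ∀ (l : List Int) (k : Int),
      scanK need i j l k = (posSpec l k need).head?.map (fun kk => [i, j, kk]) := by
  intro l
  induction l with
  | nil => intro k; rfl
  | cons a rest ih =>
    intro k
    simp only [scanK, posSpec]
    by_cases hc : a = need
    · rw [if_pos hc, if_pos hc]; rfl
    · rw [if_neg hc, if_neg hc, List.nil_append]
      exact ih (k + 1)

-- first index > j with value v over the whole array = first matching index scanning from j+1
lemma firstGt_posSpec (arr : List Int) (v j : Int) (hj : 0 ≤ j) :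
    firstGt (posSpec arr 0 v) j = (posSpec (arr.drop (j + 1).toNat) (j + 1) v).head? := by
  by_cases hn : j + 1 ≤ (arr.length : Int)
  · have htd := List.take_append_drop (j + 1).toNat arr
    have hlen : ((arr.take (j + 1).toNat).length : Int) = j + 1 := by
      rw [List.length_take]; omega
    conv_lhs => rw [← htd]
    rw [posSpec_append]
    rw [firstGt_append_le _ _ _ (fun x hx => by
      have := posSpec_lt _ _ _ _ hx
      rw [hlen] at this
      omega)]
    rw [hlen, zero_add]
    rw [firstGt_all_gt _ _ (fun x hx => by
      have := posSpec_ge _ _ _ _ hx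
      omega)]
  · have hdrop : arr.drop (j + 1).toNat = [] := List.drop_eq_nil_of_le (by omega)
    rw [hdrop]
    simp only [posSpec, List.head?_nil]
    have : firstGt (posSpec arr 0 v ++ []) j = firstGt [] j :=
      firstGt_append_le _ _ _ (fun x hx => by
        have := posSpec_lt _ _ _ _ hx
        omega)
    rw [List.append_nil] at this
    rw [this]
    rfl

-- the two inner results agree for any j ≥ 0 (with enough fuel)
lemma inner_eq (arr : List Int) (target i j : Int) (hj : 0 ≤ j) :
    fLoopK arr target i j arr.length (j + 1) =
      (firstGt ((buildPos arr).getD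
          (target - PySem.List.pyGetD arr i 0 - PySem.List.pyGetD arr j 0) []) j).map
        (fun k => [i, j, k]) := by
  rw [fLoopK_eq_scanK arr target i j (arr.drop (j + 1).toNat) arr.length (j + 1)
      (by omega) rfl (by omega)]
  rw [scanK_eq_head, buildPos_getD, firstGt_posSpec _ _ _ hj]

lemma loopJ_eq (arr : List Int) (target i : Int) :
    ∀ (fuel : Nat) (j : Int), 0 ≤ j →
      fLoopJ arr target i fuel j = bLoopJ arr target (buildPos arr) i fuel j := by
  intro fuel
  induction fuel with
  | zero => intro j _; rfl
  | succ f ih =>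
    intro j hj
    rw [fLoopJ, bLoopJ]
    by_cases hlt : j < (arr.length : Int)
    · rw [if_pos hlt, if_pos hlt]
      simp only
      rw [inner_eq arr target i j hj]
      cases firstGt ((buildPos arr).getD
          (target - PySem.List.pyGetD arr i 0 - PySem.List.pyGetD arr j 0) []) j with
      | none =>
        simp only [Option.map_none]
        exact ih (j + 1) (by omega)
      | some k => simp only [Option.map_some]
    · rw [if_neg hlt, if_neg hlt]

lemma loopI_eq (arr : List Int) (target : Int) :
    ∀ (fuel : Nat) (i : Int), 0 ≤ i →
      fLoopI arr target fuel i = bLoopI arr target (buildPos arr) fuel i := by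
  intro fuel
  induction fuel with
  | zero => intro i _; rfl
  | succ f ih =>
    intro i hi
    rw [fLoopI, bLoopI]
    by_cases hlt : i < (arr.length : Int)
    · rw [if_pos hlt, if_pos hlt]
      rw [loopJ_eq arr target i arr.length (i + 1) (by omega)]
      cases bLoopJ arr target (buildPos arr) i arr.length (i + 1) with
      | none =>
        simp only
        exact ih (i + 1) (by omega)
      | some r => simp only
    · rw [if_neg hlt, if_neg hlt]

-- ===== VERDICT (by name: the statement is the Claim_ definition above) =====
theorem find_triplet_sum_spec : Claim_equal_find_triplet_sum := by
  intro arr target _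
  unfold Spec_find_triplet_sum find_triplet_sum find_triplet_sum_alt
  rw [loopI_eq arr target arr.length 0 (by omega)]
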